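-- pv_equiv track=rewrite | github.com/hardikpnsp/advent-of-code-2021 | 21-dirac-dice/game.py | take_turn_dirac_dice
-- ===== SOURCE A (Python) =====
-- def take_turn_dirac_dice(pos, score):
--     possible_moves = [3, 4, 5, 4, 5, 6, 5, 6, 7, 4, 5, 6, 5, 6, 7, 6, 7, 8, 5, 6, 7, 6, 7, 8, 7, 8, 9]
--     result = []
--     for move in possible_moves:
--         p = pos + move
--         if p > 10:
--             p -= 10
--         s = score + p
--         result.append((p, s))
--     return result
-- ===== SOURCE B (Python) =====
-- def take_turn_dirac_dice(pos, score):
--     # Recursively generate the sums of n three-sided dice, then build the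
--     # output in two staged mapping passes (positions, then (pos, score) pairs).
--     def rolls(n):
--         if n == 0:
--             return [0]
--         tails = rolls(n - 1)
--         return [d + s for d in (1, 2, 3) for s in tails]
--     ps = [pos + m - 10 if pos + m > 10 else pos + m for m in rolls(3)]
--     return [(p, score + p) for p in ps]
-- ===== Notes on version B (the rewrite author's own statement) =====
-- stated objective: alternative
-- what changed: B replaces A's hardcoded 27-entry move table and single accumulator loop by a recursive generator of n-dice roll sums plus two staged comprehension passes (wrapped positions, then (position, score) pairs).
import Mathlib
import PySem

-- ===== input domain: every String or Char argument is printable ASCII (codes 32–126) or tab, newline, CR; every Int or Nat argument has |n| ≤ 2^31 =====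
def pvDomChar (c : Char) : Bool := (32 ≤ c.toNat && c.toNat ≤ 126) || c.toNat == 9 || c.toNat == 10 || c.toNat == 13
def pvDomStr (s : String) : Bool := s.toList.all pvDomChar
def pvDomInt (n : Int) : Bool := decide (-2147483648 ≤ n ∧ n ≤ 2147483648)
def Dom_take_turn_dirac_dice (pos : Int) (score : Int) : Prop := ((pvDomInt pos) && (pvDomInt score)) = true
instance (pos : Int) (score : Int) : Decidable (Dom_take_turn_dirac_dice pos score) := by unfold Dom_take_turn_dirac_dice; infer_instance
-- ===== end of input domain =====

-- B replaces A's hardcoded move table and accumulator loop by a recursive n-dice roll-sum generator and two staged mapping passes (objective: alternative decomposition; return values identical).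

-- ===== PORT A =====
def take_turn_dirac_dice (pos : Int) (score : Int) : List (Int × Int) :=
  let possible_moves : List Int := [3, 4, 5, 4, 5, 6, 5, 6, 7, 4, 5, 6, 5, 6, 7, 6, 7, 8, 5, 6, 7, 6, 7, 8, 7, 8, 9]
  possible_moves.foldl (fun result move =>
    let p := pos + move
    let p := if p > 10 then p - 10 else p
    let s := score + p
    result ++ [(p, s)]) []

-- ===== PORT B =====
-- rolls(n): sums of n three-sided dice, in comprehension order
def pvRolls : Nat → List Int
  | 0 => [0]
  | n + 1 =>
    let tails := pvRolls n
    ([1, 2, 3] : List Int).flatMap (fun d => tails.map (fun s => d + s))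

def take_turn_dirac_dice_alt (pos : Int) (score : Int) : List (Int × Int) :=
  let ps := (pvRolls 3).map (fun m => if pos + m > 10 then pos + m - 10 else pos + m)
  ps.map (fun p => (p, score + p))

-- ===== PRECONDITION & SPEC =====
def Spec_take_turn_dirac_dice (pos : Int) (score : Int) (out : List (Int × Int)) : Prop := out = take_turn_dirac_dice_alt pos score
instance (pos : Int) (score : Int) (out : List (Int × Int)) : Decidable (Spec_take_turn_dirac_dice pos score out) := by unfold Spec_take_turn_dirac_dice; infer_instance

-- ===== CLAIM (what is proved, stated in full; the proofs are below) =====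
def Claim_equal_take_turn_dirac_dice : Prop := ∀ (pos : Int) (score : Int), Dom_take_turn_dirac_dice pos score → Spec_take_turn_dirac_dice pos score (take_turn_dirac_dice pos score)

-- ===== LEMMAS AND PROOFS =====

-- ===== VERDICT (by name: the statement is the Claim_ definition above) =====
theorem take_turn_dirac_dice_spec : Claim_equal_take_turn_dirac_dice := by
  intro pos score _
  unfold Spec_take_turn_dirac_dice take_turn_dirac_dice take_turn_dirac_dice_alt
  rw [show pvRolls 3 = [3, 4, 5, 4, 5, 6, 5, 6, 7, 4, 5, 6, 5, 6, 7, 6, 7, 8, 5, 6, 7, 6, 7, 8, 7, 8, 9] from by decide]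
  simp only [List.foldl, List.map]
  norm_num
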